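-- pv_equiv track=rewrite | github.com/martin-webb/AdventOfCodePython | 2025/day06.py | part1
-- ===== SOURCE A (Python) =====
-- from typing import Callable
--
-- OpFunc = Callable[[int, int], int]
--
-- def parse_operators_line(line: str) -> tuple[list[int], list[OpFunc]]:
--     """
--     Parse the final line into two lists, one containing running subtotals and
--     the other containing lambda expressions that can be applied to a subtotal
--     and an operand.
--     """
--     subtotals: list[int] = list()
--     operators: list[OpFunc] = list()
--
--     for operator in line.split():
--         if operator == "+":
--             subtotals.append(0)
--             operators.append(lambda total, n: total + n)
--         elif operator == "*":
--             subtotals.append(1)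
--             operators.append(lambda total, n: total * n)
--         else:
--             assert False, f"Unsupported operator '{operator}'"
--
--     return (subtotals, operators)
--
-- def part1(input: str) -> int:
--     lines = input.strip().split("\n")
--
--     operand_lines = lines[:-1]
--     operator_line = lines[-1]
--
--     # Operator parsing can be the same for parts 1 and 2
--     subtotals, operators = parse_operators_line(operator_line)
--
--     # Cephalopod math
--     for line in reversed(operand_lines):
--         operands = line.split()
--         for x, operand in enumerate(operands):
--             subtotals[x] = operators[x](subtotals[x], int(operand))
--
--     total = sum(subtotals)
--     return total
-- ===== SOURCE B (Python) =====
-- def part1(input: str) -> int: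
--     lines = input.strip().split("\n")
--     operators = lines[-1].split()
--     columns = [[] for _ in operators]
--     for line in lines[:-1]:
--         for x, token in enumerate(line.split()):
--             columns[x].append(int(token))
--     total = 0
--     for op, col in zip(operators, columns):
--         if op == "+":
--             total += sum(col)
--         elif op == "*":
--             p = 1
--             for v in col:
--                 p *= v
--             total += p
--         else:
--             assert False, f"Unsupported operator '{op}'"
--     return total
-- ===== Notes on version B (the rewrite author's own statement) =====
-- stated objective: alternative
-- what changed: Instead of threading a mutable subtotal vector through the rows in reverse with per-operator closures, B buckets the operands into per-column lists in one forward pass and then reduces each column with sum or a product loop according to its operator.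
import Mathlib
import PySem

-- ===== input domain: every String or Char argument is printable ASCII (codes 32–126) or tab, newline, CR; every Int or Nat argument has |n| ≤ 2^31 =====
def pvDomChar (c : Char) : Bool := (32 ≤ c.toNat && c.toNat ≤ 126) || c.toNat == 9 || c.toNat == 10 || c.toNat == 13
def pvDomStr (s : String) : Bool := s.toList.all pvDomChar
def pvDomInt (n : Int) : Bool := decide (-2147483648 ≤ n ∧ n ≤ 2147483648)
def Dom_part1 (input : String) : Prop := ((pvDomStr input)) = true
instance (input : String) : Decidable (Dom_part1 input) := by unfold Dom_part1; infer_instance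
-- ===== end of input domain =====

-- B replaces A's reversed-row subtotal updates with per-column bucket lists reduced by sum/product (alternative decomposition; same cost).


-- ===== PORT A =====
inductive PvOp | add | mul
deriving DecidableEq, Repr

-- the lambdas A stores: applying a stored operator to (subtotal, operand)
def pvApplyOp : PvOp → Int → Int → Int
  | .add, t, n => t + n
  | .mul, t, n => t * n

-- parse_operators_line; on a token other than "+"/"*" Python raises AssertionError
-- (excluded by Pre_part1), here the state is left unchanged
def parseOperatorsLine (line : String) : List Int × List PvOp :=
  (PySem.Str.split₀ line).foldl
    (fun st op =>
      if op = "+" then (st.1 ++ [0], st.2 ++ [PvOp.add])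
      else if op = "*" then (st.1 ++ [1], st.2 ++ [PvOp.mul])
      else st)
    ([], [])

def part1 (input : String) : Int :=
  let lines := (PySem.Str.split? (PySem.Str.strip input) "\n").getD []
  let operandLines := PySem.List.slice lines none (some (-1))
  let operatorLine := (PySem.List.pyGet? lines (-1)).getD ""
  let st := parseOperatorsLine operatorLine
  -- operators[x] / subtotals[x] out of range is a Python IndexError (excluded by Pre_part1)
  let final := operandLines.reverse.foldl
    (fun s line =>
      (PySem.List.enumerate (PySem.Str.split₀ line) 0).foldl
        (fun s p =>
          PySem.List.pySetD s p.1
            (pvApplyOp (PySem.List.pyGetD st.2 p.1 PvOp.add)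
              (PySem.List.pyGetD s p.1 0)
              ((PySem.Int.ofStr? p.2).getD 0)))
        s)
    st.1
  final.sum

-- ===== PORT B =====
def part1_alt (input : String) : Int :=
  let lines := (PySem.Str.split? (PySem.Str.strip input) "\n").getD []
  let operators := PySem.Str.split₀ ((PySem.List.pyGet? lines (-1)).getD "")
  let columns0 : List (List Int) := operators.map (fun _ => [])
  -- columns[x].append(int(token)); x out of range is a Python IndexError (excluded by Pre_part1)
  let columns := (PySem.List.slice lines none (some (-1))).foldl
    (fun cols line =>
      (PySem.List.enumerate (PySem.Str.split₀ line) 0).foldl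
        (fun cols p =>
          PySem.List.pySetD cols p.1
            (PySem.List.pyGetD cols p.1 [] ++ [(PySem.Int.ofStr? p.2).getD 0]))
        cols)
    columns0
  -- on a token other than "+"/"*" Python raises AssertionError (excluded by Pre_part1): total unchanged
  (operators.zip columns).foldl
    (fun total oc =>
      if oc.1 = "+" then total + oc.2.sum
      else if oc.1 = "*" then total + oc.2.foldl (fun p v => p * v) 1
      else total)
    0

-- ===== PRECONDITION & SPEC =====
-- Pre_ excludes exactly the inputs where Python A raises: an operator-line token other than
-- "+"/"*" (AssertionError), an operand row wider than the operator line (IndexError), and an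
-- operand token that is not a valid int literal (ValueError).
def Pre_part1 (input : String) : Prop :=
  let lines := (PySem.Str.split? (PySem.Str.strip input) "\n").getD []
  let opToks := PySem.Str.split₀ ((PySem.List.pyGet? lines (-1)).getD "")
  (∀ t ∈ opToks, t = "+" ∨ t = "*") ∧
  ∀ line ∈ lines.dropLast,
    (PySem.Str.split₀ line).length ≤ opToks.length ∧
    ∀ t ∈ PySem.Str.split₀ line, (PySem.Int.ofStr? t).isSome = true

instance (input : String) : Decidable (Pre_part1 input) := by unfold Pre_part1; infer_instance

def pvWitness_part1 : String := "1 2\n3 4\n+ *"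

def Spec_part1 (input : String) (out : Int) : Prop := out = part1_alt input
instance (input : String) (out : Int) : Decidable (Spec_part1 input out) := by unfold Spec_part1; infer_instance

-- ===== CLAIM (what is proved, stated in full; the proofs are below) =====
def Claim_equal_part1 : Prop := ∀ (input : String), Dom_part1 input → Pre_part1 input → Spec_part1 input (part1 input)

-- ===== LEMMAS AND PROOFS =====

-- the int(token) both programs apply (total form; Pre_ guarantees isSome)
def pvParse (t : String) : Int := (PySem.Int.ofStr? t).getD 0

-- the x-th column of tokens of a block of lines
def pvColumn (x : Nat) (ls : List String) : List String :=
  ls.filterMap (fun line => (PySem.Str.split₀ line)[x]?)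

-- the inner 'for x, tok in enumerate(...)' loop of either port preserves the state's length
theorem pvInnerLen {α : Type} (F : Int → α → String → α) (d : α) :
    ∀ (ps : List (Int × String)) (s : List α),
      (ps.foldl (fun s p => PySem.List.pySetD s p.1 (F p.1 (PySem.List.pyGetD s p.1 d) p.2)) s).length
        = s.length := by
  intro ps
  induction ps with
  | nil => intro s; rfl
  | cons p ps ih =>
      intro s
      simp only [List.foldl_cons, ih, PySem.List.length_pySetD]

-- pointwise effect of the inner loop: position x is updated once iff the row reaches it
theorem pvInnerGetD {α : Type} (F : Int → α → String → α) (d : α) :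
    ∀ (toks : List String) (k : Nat) (s : List α) (x : Nat), x < s.length →
      ((PySem.List.enumerate toks (k : Int)).foldl
          (fun s p => PySem.List.pySetD s p.1 (F p.1 (PySem.List.pyGetD s p.1 d) p.2)) s).getD x d
        = if k ≤ x ∧ x < k + toks.length then F (x : Int) (s.getD x d) (toks.getD (x - k) "")
          else s.getD x d := by
  intro toks
  induction toks with
  | nil =>
      intro k s x hx
      simp [PySem.List.enumerate_nil]
  | cons t ts ih =>
      intro k s x hx
      rw [PySem.List.enumerate_cons, List.foldl_cons]
      rw [show ((k : Int) + 1) = (((k + 1 : Nat)) : Int) by push_cast; ring]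
      simp only [PySem.List.pySetD_natCast, PySem.List.pyGetD_natCast]
      rw [ih (k + 1) (s.set k (F k (s.getD k d) t)) x (by simpa using hx)]
      by_cases hxk : x = k
      · subst hxk
        have h1 : ¬ (x + 1 ≤ x ∧ x < x + 1 + ts.length) := by omega
        have h2 : x ≤ x ∧ x < x + (t :: ts).length := ⟨le_refl x, by simp⟩
        rw [if_neg h1, if_pos h2]
        simp [List.getD_eq_getElem?_getD, hx]
      · have hgd : (s.set k (F k (s.getD k d) t)).getD x d = s.getD x d := by
          simp [List.getD_eq_getElem?_getD, Ne.symm hxk]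
        rw [hgd]
        by_cases hc : k + 1 ≤ x ∧ x < k + 1 + ts.length
        · rw [if_pos hc, if_pos (by simp; omega)]
          have hxk1 : x - k = (x - (k + 1)) + 1 := by omega
          rw [hxk1]
          simp
        · rw [if_neg hc, if_neg (by simp; omega)]

-- pointwise effect of the outer loop over the rows: position x folds F over its column
theorem pvOuterGetD {α : Type} (F : Int → α → String → α) (d : α) :
    ∀ (ls : List String) (s : List α) (x : Nat), x < s.length →
      ((ls.foldl
          (fun s line =>
            (PySem.List.enumerate (PySem.Str.split₀ line) 0).foldl
              (fun s p => PySem.List.pySetD s p.1 (F p.1 (PySem.List.pyGetD s p.1 d) p.2)) s) s).getD x d)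
        = (pvColumn x ls).foldl (fun old t => F (x : Int) old t) (s.getD x d) := by
  intro ls
  induction ls with
  | nil => intro s x hx; simp [pvColumn]
  | cons line rest ih =>
      intro s x hx
      rw [List.foldl_cons]
      have hz : (0 : Int) = ((0 : Nat) : Int) := by simp
      set s' := (PySem.List.enumerate (PySem.Str.split₀ line) 0).foldl
        (fun s p => PySem.List.pySetD s p.1 (F p.1 (PySem.List.pyGetD s p.1 d) p.2)) s with hs'
      have hlen : s'.length = s.length := by
        rw [hs']; exact pvInnerLen F d _ s
      rw [ih s' x (by omega)]
      have hgd : s'.getD x d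
          = if x < (PySem.Str.split₀ line).length then F (x : Int) (s.getD x d) ((PySem.Str.split₀ line).getD x "")
            else s.getD x d := by
        rw [hs', hz, pvInnerGetD F d _ 0 s x hx]
        simp
      simp only [pvColumn, List.filterMap_cons]
      by_cases hlt : x < (PySem.Str.split₀ line).length
      · rw [List.getElem?_eq_getElem hlt, List.foldl_cons]
        rw [hgd, if_pos hlt, List.getD_eq_getElem _ _ hlt]
      · rw [List.getElem?_eq_none (by omega)]
        rw [hgd, if_neg hlt]

-- outer loop preserves the state's length
theorem pvOuterLen {α : Type} (F : Int → α → String → α) (d : α) :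
    ∀ (ls : List String) (s : List α),
      (ls.foldl
          (fun s line =>
            (PySem.List.enumerate (PySem.Str.split₀ line) 0).foldl
              (fun s p => PySem.List.pySetD s p.1 (F p.1 (PySem.List.pyGetD s p.1 d) p.2)) s) s).length
        = s.length := by
  intro ls
  induction ls with
  | nil => intro s; rfl
  | cons line rest ih =>
      intro s
      rw [List.foldl_cons, ih, pvInnerLen F d]

-- parse_operators_line on a valid operator line is two maps
theorem pvParseOps (line : String)
    (h : ∀ t ∈ PySem.Str.split₀ line, t = "+" ∨ t = "*") :
    parseOperatorsLine line
      = ((PySem.Str.split₀ line).map (fun t => if t = "+" then (0 : Int) else 1),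
         (PySem.Str.split₀ line).map (fun t => if t = "+" then PvOp.add else PvOp.mul)) := by
  unfold parseOperatorsLine
  suffices hgen : ∀ (ts : List String), (∀ t ∈ ts, t = "+" ∨ t = "*") → ∀ (a : List Int) (b : List PvOp),
      (ts.foldl (fun st op =>
          if op = "+" then (st.1 ++ [0], st.2 ++ [PvOp.add])
          else if op = "*" then (st.1 ++ [1], st.2 ++ [PvOp.mul])
          else st) (a, b))
        = (a ++ ts.map (fun t => if t = "+" then (0 : Int) else 1),
           b ++ ts.map (fun t => if t = "+" then PvOp.add else PvOp.mul)) by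
    simpa using hgen (PySem.Str.split₀ line) h [] []
  intro ts
  induction ts with
  | nil => intro _ a b; simp
  | cons t ts ih =>
      intro h a b
      rw [List.foldl_cons]
      rcases h t (by simp) with ht | ht <;> subst ht <;> simp <;>
        rw [ih (fun u hu => h u (by simp [hu]))] <;> simp

-- a multiplying loop is the product
theorem pvFoldMul {β : Type} (g : β → Int) : ∀ (l : List β) (a : Int),
    l.foldl (fun acc t => acc * g t) a = a * (l.map g).prod := by
  intro l
  induction l with
  | nil => intro a; simp
  | cons v l ih => intro a; rw [List.foldl_cons, ih]; simp; ring

-- port A's outer loop, specialized: position x folds its operator over column x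
theorem pvAGetD (opsV : List PvOp) (ls : List String) (s : List Int) (x : Nat) (hx : x < s.length) :
    ((ls.foldl
        (fun s line =>
          (PySem.List.enumerate (PySem.Str.split₀ line) 0).foldl
            (fun s p =>
              PySem.List.pySetD s p.1
                (pvApplyOp (PySem.List.pyGetD opsV p.1 PvOp.add)
                  (PySem.List.pyGetD s p.1 0)
                  ((PySem.Int.ofStr? p.2).getD 0)))
            s)
        s).getD x 0)
      = (pvColumn x ls).foldl
          (fun old t => pvApplyOp (opsV.getD x PvOp.add) old ((PySem.Int.ofStr? t).getD 0))
          (s.getD x 0) := by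
  simpa using pvOuterGetD
    (fun i old t => pvApplyOp (PySem.List.pyGetD opsV i PvOp.add) old ((PySem.Int.ofStr? t).getD 0))
    0 ls s x hx

theorem pvALen (opsV : List PvOp) (ls : List String) (s : List Int) :
    (ls.foldl
        (fun s line =>
          (PySem.List.enumerate (PySem.Str.split₀ line) 0).foldl
            (fun s p =>
              PySem.List.pySetD s p.1
                (pvApplyOp (PySem.List.pyGetD opsV p.1 PvOp.add)
                  (PySem.List.pyGetD s p.1 0)
                  ((PySem.Int.ofStr? p.2).getD 0)))
            s)
        s).length = s.length := by
  simpa using pvOuterLen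
    (fun i old t => pvApplyOp (PySem.List.pyGetD opsV i PvOp.add) old ((PySem.Int.ofStr? t).getD 0))
    0 ls s

-- port B's bucketing loop, specialized: position x collects the parsed column x
theorem pvBGetD (ls : List String) (s : List (List Int)) (x : Nat) (hx : x < s.length) :
    ((ls.foldl
        (fun cols line =>
          (PySem.List.enumerate (PySem.Str.split₀ line) 0).foldl
            (fun cols p =>
              PySem.List.pySetD cols p.1
                (PySem.List.pyGetD cols p.1 [] ++ [(PySem.Int.ofStr? p.2).getD 0]))
            cols)
        s).getD x [])
      = (pvColumn x ls).foldl (fun old t => old ++ [(PySem.Int.ofStr? t).getD 0]) (s.getD x []) := by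
  simpa using pvOuterGetD
    (fun i old t => old ++ [(PySem.Int.ofStr? t).getD 0]) ([] : List Int) ls s x hx

theorem pvBLen (ls : List String) (s : List (List Int)) :
    (ls.foldl
        (fun cols line =>
          (PySem.List.enumerate (PySem.Str.split₀ line) 0).foldl
            (fun cols p =>
              PySem.List.pySetD cols p.1
                (PySem.List.pyGetD cols p.1 [] ++ [(PySem.Int.ofStr? p.2).getD 0]))
            cols)
        s).length = s.length := by
  simpa using pvOuterLen
    (fun i old t => old ++ [(PySem.Int.ofStr? t).getD 0]) ([] : List Int) ls s

theorem pvFoldMulId : ∀ (l : List Int) (a : Int),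
    l.foldl (fun p v => p * v) a = a * l.prod := by
  intro l a
  simpa using pvFoldMul (fun v => v) l a

theorem pvFoldStep : ∀ (l : List (String × List Int)) (a : Int),
    l.foldl (fun total oc =>
        if oc.1 = "+" then total + oc.2.sum
        else if oc.1 = "*" then total + oc.2.foldl (fun p v => p * v) 1
        else total) a
      = a + (l.map (fun oc =>
          if oc.1 = "+" then oc.2.sum
          else if oc.1 = "*" then oc.2.foldl (fun p v => p * v) 1
          else 0)).sum := by
  intro l
  induction l with
  | nil => intro a; simp
  | cons oc l ih =>
      intro a
      rw [List.foldl_cons, List.map_cons, List.sum_cons]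
      split_ifs <;> rw [ih] <;> ring

-- the central equality, over the token lists both ports extract from the input
theorem pvMain (toks rows : List String) (hops : ∀ t ∈ toks, t = "+" ∨ t = "*") :
    (rows.reverse.foldl
        (fun s line =>
          (PySem.List.enumerate (PySem.Str.split₀ line) 0).foldl
            (fun s p =>
              PySem.List.pySetD s p.1
                (pvApplyOp
                  (PySem.List.pyGetD (toks.map (fun t => if t = "+" then PvOp.add else PvOp.mul)) p.1 PvOp.add)
                  (PySem.List.pyGetD s p.1 0)
                  ((PySem.Int.ofStr? p.2).getD 0)))
            s)
        (toks.map (fun t => if t = "+" then (0 : Int) else 1))).sum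
      = (toks.zip
          (rows.foldl
            (fun cols line =>
              (PySem.List.enumerate (PySem.Str.split₀ line) 0).foldl
                (fun cols p =>
                  PySem.List.pySetD cols p.1
                    (PySem.List.pyGetD cols p.1 [] ++ [(PySem.Int.ofStr? p.2).getD 0]))
                cols)
            (toks.map (fun _ => ([] : List Int))))).foldl
          (fun total oc =>
            if oc.1 = "+" then total + oc.2.sum
            else if oc.1 = "*" then total + oc.2.foldl (fun p v => p * v) 1
            else total)
          0 := by
  have hops' : ∀ (x : Nat) (hx : x < toks.length), toks[x] = "+" ∨ toks[x] = "*" :=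
    fun x hx => hops _ (toks.getElem_mem hx)
  set C := rows.foldl
      (fun cols line =>
        (PySem.List.enumerate (PySem.Str.split₀ line) 0).foldl
          (fun cols p =>
            PySem.List.pySetD cols p.1
              (PySem.List.pyGetD cols p.1 [] ++ [(PySem.Int.ofStr? p.2).getD 0]))
          cols)
      (toks.map (fun _ => ([] : List Int))) with hCdef
  set A := rows.reverse.foldl
      (fun s line =>
        (PySem.List.enumerate (PySem.Str.split₀ line) 0).foldl
          (fun s p =>
            PySem.List.pySetD s p.1
              (pvApplyOp
                (PySem.List.pyGetD (toks.map (fun t => if t = "+" then PvOp.add else PvOp.mul)) p.1 PvOp.add)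
                (PySem.List.pyGetD s p.1 0)
                ((PySem.Int.ofStr? p.2).getD 0)))
          s)
      (toks.map (fun t => if t = "+" then (0 : Int) else 1)) with hAdef
  have hClen : C.length = toks.length := by
    rw [hCdef]; simpa using pvBLen rows (toks.map (fun _ => ([] : List Int)))
  have hAlen : A.length = toks.length := by
    rw [hAdef]
    simpa using pvALen (toks.map (fun t => if t = "+" then PvOp.add else PvOp.mul)) rows.reverse
      (toks.map (fun t => if t = "+" then (0 : Int) else 1))
  have hCx : ∀ (x : Nat) (hx : x < toks.length),
      C.getD x [] = (pvColumn x rows).map (fun t => (PySem.Int.ofStr? t).getD 0) := by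
    intro x hx
    rw [hCdef, pvBGetD rows _ x (by simpa)]
    rw [List.getD_eq_getElem _ _ (by simpa using hx), List.getElem_map]
    simpa using PySem.List.foldl_append_singleton_eq_map (fun t => (PySem.Int.ofStr? t).getD 0)
      (pvColumn x rows) []
  have hcolrev : ∀ (x : Nat), pvColumn x rows.reverse = (pvColumn x rows).reverse := by
    intro x; simp [pvColumn, List.filterMap_reverse]
  have hAx : ∀ (x : Nat) (hx : x < toks.length),
      A.getD x 0 = (if toks[x] = "+" then (C.getD x []).sum else (C.getD x []).prod) := by
    intro x hx
    rw [hAdef, pvAGetD _ rows.reverse _ x (by simpa)]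
    rw [List.getD_eq_getElem _ _ (by simpa using hx), List.getElem_map]
    rw [List.getD_eq_getElem _ _ (by simpa using hx), List.getElem_map]
    rw [hcolrev x, hCx x hx]
    have hadd : ∀ (a b : Int), pvApplyOp PvOp.add a b = a + b := fun _ _ => rfl
    have hmul : ∀ (a b : Int), pvApplyOp PvOp.mul a b = a * b := fun _ _ => rfl
    rcases hops' x hx with h | h <;> rw [h]
    · simp only [reduceIte, hadd]
      rw [PySem.List.foldl_add (g := fun t => (PySem.Int.ofStr? t).getD 0)]
      simp
    · simp only [String.reduceEq, reduceIte, hmul]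
      rw [pvFoldMul (fun t => (PySem.Int.ofStr? t).getD 0)]
      simp
  -- the final subtotal list IS the list of per-column reductions
  have hAC : A = (toks.zip C).map
      (fun oc =>
        if oc.1 = "+" then oc.2.sum
        else if oc.1 = "*" then oc.2.foldl (fun p v => p * v) 1
        else 0) := by
    apply List.ext_getElem
    · simp [hAlen, hClen]
    · intro i h1 h2
      rw [List.getElem_map, List.getElem_zip]
      have hi : i < toks.length := by omega
      have := hAx i hi
      rw [List.getD_eq_getElem _ _ h1] at this
      rw [this]
      have hC : C[i] = C.getD i [] := (List.getD_eq_getElem _ _ (by omega)).symm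
      rw [← hC]
      rcases hops' i hi with h | h <;> rw [h] <;> simp only [String.reduceEq, reduceIte]
      rw [pvFoldMulId]
      simp
  rw [hAC, pvFoldStep]
  simp


theorem part1_main : ∀ (input : String), Pre_part1 input → part1 input = part1_alt input := by
  intro input hpre
  simp only [Pre_part1] at hpre
  obtain ⟨hops, -⟩ := hpre
  simp only [part1, part1_alt, PySem.List.slice_to_neg_one]
  rw [pvParseOps _ hops]
  dsimp only
  exact pvMain _ _ hops

-- ===== VERDICT (by name: the statement is the Claim_ definition above) =====
theorem part1_spec : Claim_equal_part1 :=
  fun input _ hpre => part1_main input hpre
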